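-- pv_equiv track=rewrite | github.com/laurisdjilo/data_visualization | src/chemicals_in_Cosmetics.py | code_feature
-- ===== SOURCE A (Python) =====
-- def code_feature(obsv_feature):
-- 	result = {}
-- 	code = 0
-- 	for row in obsv_feature:
-- 		if not str(row) in result:
-- 			result[str(row)]=code
-- 			code = code+1
-- 	return result
-- ===== SOURCE B (Python) =====
-- def code_feature(obsv_feature):
--     # Different algorithm: one reversed pass records each key's FIRST-occurrence
--     # index (later writes overwrite earlier ones), then the keys are sorted by
--     # that index and numbered; no running counter, no test-and-assign scan.
--     rows = [str(row) for row in obsv_feature]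
--     first = {r: i for i, r in reversed(list(enumerate(rows)))}
--     order = sorted(first, key=first.get)
--     return {r: c for c, r in enumerate(order)}
-- ===== Notes on version B (the rewrite author's own statement) =====
-- stated objective: alternative
-- what changed: Replaces A's test-and-assign scan (dict grown together with a running counter) by a reversed-overwrite pass that records each key's first-occurrence index, followed by sorting the keys on that index and numbering the sorted order.
import Mathlib
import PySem

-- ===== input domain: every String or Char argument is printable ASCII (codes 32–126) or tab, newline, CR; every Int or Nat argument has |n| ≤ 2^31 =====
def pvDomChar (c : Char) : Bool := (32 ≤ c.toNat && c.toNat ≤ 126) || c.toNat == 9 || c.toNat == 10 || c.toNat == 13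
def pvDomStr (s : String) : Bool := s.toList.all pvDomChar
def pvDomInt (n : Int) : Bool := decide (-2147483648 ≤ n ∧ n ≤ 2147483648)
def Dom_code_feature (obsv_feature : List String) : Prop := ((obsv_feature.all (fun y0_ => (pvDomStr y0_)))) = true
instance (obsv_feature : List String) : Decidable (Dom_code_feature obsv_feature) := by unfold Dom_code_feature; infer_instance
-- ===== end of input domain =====

-- B replaces A's test-and-assign scan (dict grown together with a running counter) by a
-- reversed-overwrite pass recording each key's first-occurrence index, then sorts the
-- keys on that index and numbers the sorted order (objective: alternative, same cost).

-- ===== PORT A =====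
-- str(row) on a string returns the string itself: ported as the identity (exact).
def code_feature (obsv_feature : List String) : List (String × Int) :=
  (obsv_feature.foldl
    (fun st row =>
      if !(st.1.contains row) then (st.1.insert row st.2, st.2 + 1) else st)
    ((PySem.Dict.empty : PySem.Dict String Int), (0 : Int))).1.items

-- ===== PORT B =====
-- str(row) on a string is the identity; reversed(list(enumerate(rows))) is the reversed
-- enumerate list; each dict comprehension is a fold of inserts over its iterable;
-- first.get r is ported as first.getD r 0 — exact here since the sort key is only
-- applied to keys of first, where get returns the stored index.
def code_feature_alt (obsv_feature : List String) : List (String × Int) :=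
  let rows := obsv_feature.map (fun row => row)
  let first := ((PySem.List.enumerate rows 0).reverse).foldl
      (fun (d : PySem.Dict String Int) p => d.insert p.2 p.1) PySem.Dict.empty
  let order := PySem.List.sorted first.keys (fun r => first.getD r 0) false
  ((PySem.List.enumerate order 0).foldl
      (fun (d : PySem.Dict String Int) c => d.insert c.2 c.1) PySem.Dict.empty).items

-- ===== PRECONDITION & SPEC =====
def Spec_code_feature (obsv_feature : List String) (out : List (String × Int)) : Prop := out = code_feature_alt obsv_feature
instance (obsv_feature : List String) (out : List (String × Int)) : Decidable (Spec_code_feature obsv_feature out) := by unfold Spec_code_feature; infer_instance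

-- ===== CLAIM (what is proved, stated in full; the proofs are below) =====
def Claim_equal_code_feature : Prop := ∀ (obsv_feature : List String), Dom_code_feature obsv_feature → Spec_code_feature obsv_feature (code_feature obsv_feature)

-- ===== LEMMAS AND PROOFS =====

-- Common normal form both ports are reduced to: the ordered distinct elements,
-- numbered from 0.
def pvNormal (xs : List String) : List (String × Int) :=
  (PySem.List.enumerate (PySem.List.dedup xs) 0).map (fun p => (p.2, p.1))

-- Loop invariant of A's fold, by induction from the right: the dict's items are the
-- deduplicated prefix numbered in order, and the counter is its length.
theorem code_feature_loop_inv (xs : List String) :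
    (xs.foldl
      (fun (st : PySem.Dict String Int × Int) row =>
        if !(st.1.contains row) then (st.1.insert row st.2, st.2 + 1) else st)
      ((PySem.Dict.empty : PySem.Dict String Int), (0 : Int))).1.items
      = pvNormal xs ∧
    (xs.foldl
      (fun (st : PySem.Dict String Int × Int) row =>
        if !(st.1.contains row) then (st.1.insert row st.2, st.2 + 1) else st)
      ((PySem.Dict.empty : PySem.Dict String Int), (0 : Int))).2
      = ((PySem.List.dedup xs).length : Int) := by
  induction xs using List.reverseRecOn with
  | nil => exact ⟨rfl, rfl⟩
  | append_singleton xs x ih =>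
    obtain ⟨h1, h2⟩ := ih
    rw [List.foldl_append, List.foldl_cons, List.foldl_nil]
    have hkeys : (xs.foldl
        (fun (st : PySem.Dict String Int × Int) row =>
          if !(st.1.contains row) then (st.1.insert row st.2, st.2 + 1) else st)
        ((PySem.Dict.empty : PySem.Dict String Int), (0 : Int))).1.keys
        = PySem.List.dedup xs := by
      rw [PySem.Dict.keys, h1, pvNormal, List.map_map]
      have : ((fun p : String × Int => p.1) ∘ fun p : Int × String => (p.2, p.1))
          = (fun p : Int × String => p.2) := rfl
      rw [this, PySem.List.map_snd_enumerate]
    by_cases hmem : x ∈ PySem.List.dedup xs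
    · have hc : (xs.foldl
          (fun (st : PySem.Dict String Int × Int) row =>
            if !(st.1.contains row) then (st.1.insert row st.2, st.2 + 1) else st)
          ((PySem.Dict.empty : PySem.Dict String Int), (0 : Int))).1.contains x = true := by
        rw [PySem.Dict.contains_iff_mem_keys, hkeys]; exact hmem
      have hd : PySem.List.dedup (xs ++ [x]) = PySem.List.dedup xs := by
        simp only [PySem.List.dedup_eq_ofList, PySem.Set.ofList_append_singleton]
        exact PySem.Set.add_of_mem (by simpa using hmem)
      rw [hc]; simp only [Bool.not_true, Bool.false_eq_true, if_false]
      exact ⟨by rw [h1, pvNormal, pvNormal, hd], by rw [h2, hd]⟩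
    · have hc : (xs.foldl
          (fun (st : PySem.Dict String Int × Int) row =>
            if !(st.1.contains row) then (st.1.insert row st.2, st.2 + 1) else st)
          ((PySem.Dict.empty : PySem.Dict String Int), (0 : Int))).1.contains x = false := by
        rw [← Bool.not_eq_true, PySem.Dict.contains_iff_mem_keys, hkeys]; exact hmem
      have hd : PySem.List.dedup (xs ++ [x]) = PySem.List.dedup xs ++ [x] := by
        simp only [PySem.List.dedup_eq_ofList, PySem.Set.ofList_append_singleton]
        exact PySem.Set.add_of_not_mem (by simpa using hmem)
      rw [hc]; simp only [Bool.not_false, if_true]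
      constructor
      · rw [PySem.Dict.items_insert_of_not_contains (h := hc), h1, h2, pvNormal, pvNormal, hd,
          PySem.List.enumerate_append]
        simp [PySem.List.enumerate]
      · rw [hd, h2]
        simp

-- Lookup in a dict built by folding inserts of (value, key) pairs: the LAST write wins,
-- i.e. the first matching pair of the reversed list.
theorem pvGet_foldl_insert (L : List (Int × String)) (k : String) :
    ((L.foldl (fun (d : PySem.Dict String Int) p => d.insert p.2 p.1)
      PySem.Dict.empty).get? k)
      = (L.reverse.find? (fun p => p.2 == k)).map (fun p => p.1) := by
  induction L using List.reverseRecOn with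
  | nil => rfl
  | append_singleton L p ih =>
    rw [List.foldl_append, List.foldl_cons, List.foldl_nil]
    simp only [List.reverse_append, List.reverse_cons, List.reverse_nil, List.nil_append,
      List.cons_append]
    by_cases h : p.2 = k
    · rw [List.find?_cons_of_pos (by simp [h]), ← h, PySem.Dict.get?_insert_self]
      rfl
    · rw [List.find?_cons_of_neg (by simp [h]), PySem.Dict.get?_insert,
        if_neg (fun e : k = p.2 => h e.symm), ih]

-- The first pair of enumerate with second component k carries k's first index.
theorem pvFind_enumerate (xs : List String) (k : String) :
    ∀ s : Int, k ∈ xs →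
    (PySem.List.enumerate xs s).find? (fun p => p.2 == k)
      = some (s + (xs.idxOf k : Int), k) := by
  induction xs with
  | nil => intro s hk; cases hk
  | cons x xs ih =>
    intro s hk
    rw [PySem.List.enumerate_cons]
    by_cases h : x = k
    · rw [List.find?_cons_of_pos (by simp [h]), h, List.idxOf_cons_self]
      simp
    · have hk' : k ∈ xs := by cases hk with
        | head => exact absurd rfl h
        | tail _ h' => exact h'
      rw [List.find?_cons_of_neg (by simp [h]), ih (s + 1) hk',
        List.idxOf_cons_ne _ h]
      refine congrArg some (Prod.ext ?_ rfl)
      push_cast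
      ring

-- getD of the 'first' dict is the first-occurrence index.
theorem pvFirst_getD (xs : List String) (k : String) (hk : k ∈ xs) :
    (((PySem.List.enumerate xs 0).reverse.foldl
        (fun (d : PySem.Dict String Int) p => d.insert p.2 p.1)
        PySem.Dict.empty).getD k 0) = (xs.idxOf k : Int) := by
  rw [PySem.Dict.getD_eq_get?_getD, pvGet_foldl_insert, List.reverse_reverse,
    pvFind_enumerate xs k 0 hk]
  simp

-- The keys of 'first' are a permutation of the ordered distinct elements.
theorem pvFirst_keys_perm (xs : List String) :
    (PySem.List.dedup xs).Perm
      (((PySem.List.enumerate xs 0).reverse.foldl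
        (fun (d : PySem.Dict String Int) p => d.insert p.2 p.1)
        PySem.Dict.empty).keys) := by
  have hkeys : (((PySem.List.enumerate xs 0).reverse.foldl
      (fun (d : PySem.Dict String Int) p => d.insert p.2 p.1)
      PySem.Dict.empty).keys)
      = PySem.Set.update (PySem.Dict.empty : PySem.Dict String Int).keys
          ((PySem.List.enumerate xs 0).reverse.map (fun p => p.2)) :=
    PySem.Dict.keys_foldl_insert_key _ _ _ _
  have hmap : (PySem.List.enumerate xs 0).reverse.map (fun p : Int × String => p.2)
      = xs.reverse := by
    rw [List.map_reverse, PySem.List.map_snd_enumerate]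
  have hu : PySem.Set.update ((PySem.Dict.empty : PySem.Dict String Int).keys) xs.reverse
      = PySem.Set.ofList xs.reverse := rfl
  rw [hkeys, hmap, hu]
  refine (List.perm_ext_iff_of_nodup (PySem.List.nodup_dedup xs)
    (PySem.Set.nodup_ofList _)).2 ?_
  intro a
  rw [PySem.List.mem_dedup, PySem.Set.mem_ofList, List.mem_reverse]

-- A fresh element appended to a list gets first-occurrence index at its end.
theorem pvIdxOf_append_self (xs : List String) (x : String) (h : x ∉ xs) :
    (xs ++ [x]).idxOf x = xs.length := by
  induction xs with
  | nil => simp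
  | cons y ys ih =>
    have hyx : y ≠ x := fun e => h (e ▸ List.mem_cons_self)
    have hx : x ∉ ys := fun hm => h (List.mem_cons_of_mem _ hm)
    simp only [List.cons_append, List.idxOf_cons_ne _ hyx, ih hx, List.length_cons]

-- Along the ordered distinct elements, first-occurrence indices strictly increase.
theorem pvDedup_idxOf_pairwise (xs : List String) :
    (PySem.List.dedup xs).Pairwise (fun a b => xs.idxOf a < xs.idxOf b) := by
  induction xs using List.reverseRecOn with
  | nil => simp [PySem.List.dedup_eq_ofList]
  | append_singleton xs x ih =>
    have hsub : ∀ a ∈ PySem.List.dedup xs, a ∈ xs := fun a ha =>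
      (PySem.List.mem_dedup _ _).1 ha
    have hidx : ∀ a ∈ PySem.List.dedup xs, (xs ++ [x]).idxOf a = xs.idxOf a :=
      fun a ha => List.idxOf_append_of_mem (hsub a ha)
    by_cases hmem : x ∈ xs
    · have hd : PySem.List.dedup (xs ++ [x]) = PySem.List.dedup xs := by
        simp only [PySem.List.dedup_eq_ofList, PySem.Set.ofList_append_singleton]
        exact PySem.Set.add_of_mem (by simpa using hmem)
      rw [hd]
      exact List.Pairwise.imp_of_mem
        (fun ha hb hab => by rw [hidx _ ha, hidx _ hb]; exact hab) ih
    · have hd : PySem.List.dedup (xs ++ [x]) = PySem.List.dedup xs ++ [x] := by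
        simp only [PySem.List.dedup_eq_ofList, PySem.Set.ofList_append_singleton]
        exact PySem.Set.add_of_not_mem (by simpa using hmem)
      rw [hd, List.pairwise_append]
      refine ⟨List.Pairwise.imp_of_mem
          (fun ha hb hab => by rw [hidx _ ha, hidx _ hb]; exact hab) ih,
        List.pairwise_singleton _ _, ?_⟩
      intro a ha b hb
      have hb' : b = x := by simpa using hb
      rw [hb', hidx a ha, pvIdxOf_append_self xs x hmem]
      exact List.idxOf_lt_length_of_mem (hsub a ha)

-- The sorted key list is exactly the ordered distinct elements.
theorem pvOrder_eq_dedup (xs : List String) :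
    PySem.List.sorted
      (((PySem.List.enumerate xs 0).reverse.foldl
        (fun (d : PySem.Dict String Int) p => d.insert p.2 p.1)
        PySem.Dict.empty).keys)
      (fun r => ((PySem.List.enumerate xs 0).reverse.foldl
        (fun (d : PySem.Dict String Int) p => d.insert p.2 p.1)
        PySem.Dict.empty).getD r 0) false
      = PySem.List.dedup xs := by
  apply PySem.List.sorted_eq_of_perm_of_pairwise_lt
  · exact pvFirst_keys_perm xs
  · refine List.Pairwise.imp_of_mem ?_ (pvDedup_idxOf_pairwise xs)
    intro a b ha hb hab
    rw [pvFirst_getD xs a ((PySem.List.mem_dedup _ _).1 ha),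
        pvFirst_getD xs b ((PySem.List.mem_dedup _ _).1 hb)]
    exact_mod_cast hab

-- The final numbering fold over distinct keys appends the pairs in order.
theorem pvNumbering (ks : List String) (hnd : ks.Nodup) :
    ((PySem.List.enumerate ks 0).foldl
      (fun (d : PySem.Dict String Int) c => d.insert c.2 c.1)
      PySem.Dict.empty).items
      = (PySem.List.enumerate ks 0).map (fun c => (c.2, c.1)) := by
  have h := PySem.Dict.items_foldl_insert_fresh
      (l := PySem.List.enumerate ks 0) (k := fun c => c.2) (v := fun c => c.1)
      (d := (PySem.Dict.empty : PySem.Dict String Int))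
      (fun a _ => rfl)
      (by rw [show (PySem.List.enumerate ks 0).map (fun c => c.2) = ks from
            PySem.List.map_snd_enumerate ks 0]; exact hnd)
  simpa using h

-- ===== VERDICT (by name: the statement is the Claim_ definition above) =====
theorem code_feature_spec : Claim_equal_code_feature := by
  intro xs _
  show code_feature xs = code_feature_alt xs
  unfold code_feature code_feature_alt
  simp only [List.map_id']
  rw [(code_feature_loop_inv xs).1, pvOrder_eq_dedup xs,
    pvNumbering (PySem.List.dedup xs) (PySem.List.nodup_dedup xs)]
  rfl
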